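-- pv_equiv track=rewrite | github.com/eladiomejias/Python | Recursividad/Encriptar.py | encripRecur
-- ===== SOURCE A (Python) =====
-- def encripRecur(lista, pals, N, cont, code):
--
-- 	if(cont<N):
-- 		if (lista.get(str.lower(pals[cont]))!=None):
-- 			code.append((lista.get(str.lower(pals[cont]))))
-- 		else:
-- 			code.append(str.lower(pals[cont]))
-- 		cont = cont + 1
-- 		return encripRecur(lista, pals, N, cont, code)
-- 	else:
-- 		return code
-- ===== SOURCE B (Python) =====
-- def encripRecur(lista, pals, N, cont, code):
--     for i in range(cont, N):
--         w = str.lower(pals[i])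
--         code.append(lista.get(w, w))
--     return code
-- ===== Notes on version B (the rewrite author's own statement) =====
-- stated objective: simpler
-- what changed: Replaces the tail recursion (with two identical dict lookups and an explicit None test per step) by a single for-loop over range(cont, N) doing one lookup per word via dict.get(w, w).
import Mathlib
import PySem

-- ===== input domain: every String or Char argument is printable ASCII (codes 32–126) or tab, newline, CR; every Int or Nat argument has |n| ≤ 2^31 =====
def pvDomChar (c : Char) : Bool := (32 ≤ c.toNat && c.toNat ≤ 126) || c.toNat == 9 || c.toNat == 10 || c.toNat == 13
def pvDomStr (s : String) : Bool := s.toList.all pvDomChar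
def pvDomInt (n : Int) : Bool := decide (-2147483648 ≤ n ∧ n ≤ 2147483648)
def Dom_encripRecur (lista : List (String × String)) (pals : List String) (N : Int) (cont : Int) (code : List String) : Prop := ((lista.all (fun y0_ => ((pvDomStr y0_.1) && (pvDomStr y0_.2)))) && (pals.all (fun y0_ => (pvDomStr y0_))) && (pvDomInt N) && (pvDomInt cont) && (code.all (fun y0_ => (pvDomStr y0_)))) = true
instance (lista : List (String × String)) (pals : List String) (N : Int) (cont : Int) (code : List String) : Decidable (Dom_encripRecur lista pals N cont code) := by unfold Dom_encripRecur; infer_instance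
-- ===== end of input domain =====

-- B replaces the tail recursion (two dict lookups + explicit None test per word) by one
-- for-loop over range(cont, N) with a single lista.get(w, w) lookup; equivalence is about
-- the RETURN value (Python A and B both also mutate `code` in place, identically).

-- dict.get k (first-match lookup on the association list; values are Strings, so the
-- Python 'get(...) != None' test is exactly 'lookup is some')
def pvLookup (lista : List (String × String)) (k : String) : Option String :=
  (lista.find? (fun p => p.1 == k)).map (·.2)

-- ===== PORT A =====
def encripRecur (lista : List (String × String)) (pals : List String) (N : Int) (cont : Int) (code : List String) : List String :=
  if h : cont < N then
    match PySem.List.pyGet? pals cont with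
    | none => code   -- IndexError in Python; excluded by Pre_
    | some p =>
      match pvLookup lista (PySem.Str.lower p) with
      | some v => encripRecur lista pals N (cont + 1) (code ++ [v])
      | none   => encripRecur lista pals N (cont + 1) (code ++ [PySem.Str.lower p])
  else code
termination_by (N - cont).toNat
decreasing_by all_goals omega

-- ===== PORT B =====
def encripRecur_alt (lista : List (String × String)) (pals : List String) (N : Int) (cont : Int) (code : List String) : List String :=
  (PySem.List.pyRange cont N 1).foldl
    (fun acc i =>
      match PySem.List.pyGet? pals i with
      | none => acc   -- IndexError in Python; excluded by Pre_
      | some p =>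
        let w := PySem.Str.lower p
        acc ++ [(pvLookup lista w).getD w])
    code

-- ===== PRECONDITION & SPEC =====
-- Pre_: every index read in the loop/recursion is a valid Python index of pals (otherwise A raises IndexError).
def Pre_encripRecur (lista : List (String × String)) (pals : List String) (N : Int) (cont : Int) (code : List String) : Prop :=
  N ≤ cont ∨ (-(pals.length : Int) ≤ cont ∧ N ≤ (pals.length : Int))
instance (lista : List (String × String)) (pals : List String) (N : Int) (cont : Int) (code : List String) : Decidable (Pre_encripRecur lista pals N cont code) := by unfold Pre_encripRecur; infer_instance

def pvWitness_encripRecur : (List (String × String)) × List String × Int × Int × List String :=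
  ([("a", "x"), ("b", "y")], ["A", "c", "b"], 3, 0, ["z"])

def Spec_encripRecur (lista : List (String × String)) (pals : List String) (N : Int) (cont : Int) (code : List String) (out : List String) : Prop := out = encripRecur_alt lista pals N cont code
instance (lista : List (String × String)) (pals : List String) (N : Int) (cont : Int) (code : List String) (out : List String) : Decidable (Spec_encripRecur lista pals N cont code out) := by unfold Spec_encripRecur; infer_instance

-- ===== CLAIM (what is proved, stated in full; the proofs are below) =====
def Claim_equal_encripRecur : Prop := ∀ (lista : List (String × String)) (pals : List String) (N : Int) (cont : Int) (code : List String), Dom_encripRecur lista pals N cont code → Pre_encripRecur lista pals N cont code → Spec_encripRecur lista pals N cont code (encripRecur lista pals N cont code)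

-- ===== LEMMAS AND PROOFS =====

theorem encripRecur_eq_alt (lista : List (String × String)) (pals : List String)
    (N : Int) (cont : Int) (code : List String)
    (hpre : N ≤ cont ∨ (-(pals.length : Int) ≤ cont ∧ N ≤ (pals.length : Int))) :
    encripRecur lista pals N cont code = encripRecur_alt lista pals N cont code := by
  rw [encripRecur]
  by_cases h : cont < N
  · have hr := PySem.List.pyRange_one_cons h
    have hin : PySem.Raise.InRange pals.length cont := by
      simp only [PySem.Raise.InRange]; omega
    obtain ⟨p, hp⟩ : ∃ p, PySem.List.pyGet? pals cont = some p := by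
      rcases hq : PySem.List.pyGet? pals cont with _ | p
      · exact absurd hin (by simpa [PySem.List.pyGet?_eq_none_iff] using hq)
      · exact ⟨p, rfl⟩
    have hpre' : N ≤ cont + 1 ∨ (-(pals.length : Int) ≤ cont + 1 ∧ N ≤ (pals.length : Int)) := by
      omega
    simp only [h, dite_true, hp]
    unfold encripRecur_alt
    rw [hr]
    simp only [List.foldl_cons, hp]
    rcases hl : pvLookup lista (PySem.Str.lower p) with _ | v <;>
      simp only [hl, Option.getD_some, Option.getD_none] <;>
      exact encripRecur_eq_alt lista pals N (cont + 1) _ hpre'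
  · simp only [h, dite_false]
    unfold encripRecur_alt
    rw [PySem.List.pyRange_one_eq_nil (by omega)]
    rfl
termination_by (N - cont).toNat
decreasing_by all_goals omega

-- ===== VERDICT (by name: the statement is the Claim_ definition above) =====
theorem encripRecur_spec : Claim_equal_encripRecur := by
  intro lista pals N cont code _ hpre
  exact encripRecur_eq_alt lista pals N cont code hpre
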